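-- pv_equiv track=rewrite | github.com/akural19/Comp-491-Senior-Design-Project | sign-recognizer-backend-main/api/ml/ml_utils.py | post_process_predictions
-- ===== SOURCE A (Python) =====
-- def post_process_predictions(predictions):
--     if not predictions:
--         return "No hand signs detected"
--
--     result = []
--     current_char = predictions[0]
--     count = 1
--
--     for pred in predictions[1:]:
--         if pred == current_char:
--             count += 1
--         else:
--             if count > 10:
--                 result.append(current_char)
--             current_char = pred
--             count = 1
--
--     if count > 10:
--         result.append(current_char)
--
--     return "".join(result) if result else "No clear hand signs detected"
-- ===== SOURCE B (Python) =====
-- def post_process_predictions(predictions):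
--     if not predictions:
--         return "No hand signs detected"
--     n = len(predictions)
--     result = [predictions[i] for i in range(n)
--               if (i == 0 or predictions[i] != predictions[i - 1])
--               and predictions[i + 1:i + 11] == [predictions[i]] * 10]
--     return "".join(result) if result else "No clear hand signs detected"
-- ===== Notes on version B (the rewrite author's own statement) =====
-- stated objective: alternative
-- what changed: Replaced A's stateful run-length loop (current_char/count with a separate final-run flush) by a stateless per-index comprehension: keep predictions[i] iff i starts a run (i==0 or differs from its predecessor) and the next-10-element window predictions[i+1:i+11] equals [predictions[i]]*10.
import Mathlib
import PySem

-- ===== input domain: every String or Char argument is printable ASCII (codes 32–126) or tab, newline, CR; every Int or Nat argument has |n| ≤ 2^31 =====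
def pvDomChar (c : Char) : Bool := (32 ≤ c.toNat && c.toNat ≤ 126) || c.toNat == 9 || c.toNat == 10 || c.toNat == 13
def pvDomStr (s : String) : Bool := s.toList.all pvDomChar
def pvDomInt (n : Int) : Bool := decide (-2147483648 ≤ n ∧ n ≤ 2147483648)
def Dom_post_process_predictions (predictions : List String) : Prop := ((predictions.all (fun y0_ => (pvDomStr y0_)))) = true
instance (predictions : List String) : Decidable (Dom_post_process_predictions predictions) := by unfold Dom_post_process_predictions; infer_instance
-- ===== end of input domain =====

-- B replaces A's run-length state machine (current_char/count with a final flush) by a stateless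
-- per-index test: keep predictions[i] iff i starts a run and the next 10 elements equal it (alternative decomposition; not faster).
-- ===== PORT A =====
def post_process_predictions (predictions : List String) : String :=
  match predictions with
  | [] => "No hand signs detected"
  | p0 :: rest =>
    let st := rest.foldl
      (fun (s : List String × String × Nat) pred =>
        if pred = s.2.1 then (s.1, s.2.1, s.2.2 + 1)
        else ((if s.2.2 > 10 then s.1 ++ [s.2.1] else s.1), pred, 1))
      ([], p0, 1)
    let result := if st.2.2 > 10 then st.1 ++ [st.2.1] else st.1
    if result.isEmpty then "No clear hand signs detected" else PySem.Str.join "" result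

-- ===== PORT B =====
-- Source B: comprehension over indices; predictions[i+1:i+11] == [predictions[i]]*10 is the lookahead test
def post_process_predictions_alt (predictions : List String) : String :=
  if predictions.isEmpty then "No hand signs detected"
  else
    let n := predictions.length
    let result := (List.range n).filterMap (fun i =>
      if (decide (i = 0) || !(predictions.getD i "" == predictions.getD (i - 1) ""))
         && (PySem.List.slice predictions (some ((i + 1 : Nat) : Int)) (some ((i + 11 : Nat) : Int))
               == List.replicate 10 (predictions.getD i ""))
      then some (predictions.getD i "") else none)
    if result.isEmpty then "No clear hand signs detected" else PySem.Str.join "" result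

-- ===== PRECONDITION & SPEC =====
def Spec_post_process_predictions (predictions : List String) (out : String) : Prop := out = post_process_predictions_alt predictions
instance (predictions : List String) (out : String) : Decidable (Spec_post_process_predictions predictions out) := by unfold Spec_post_process_predictions; infer_instance

-- ===== CLAIM (what is proved, stated in full; the proofs are below) =====
def Claim_equal_post_process_predictions : Prop := ∀ (predictions : List String), Dom_post_process_predictions predictions → Spec_post_process_predictions predictions (post_process_predictions predictions)

-- ===== LEMMAS AND PROOFS =====

-- run pairs emitted by A's loop
def pvEmit (rs : List (String × Nat)) : List String :=
  rs.filterMap (fun g => if g.2 > 10 then some g.1 else none)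

def pvMerge (c : String) (k : Nat) : List String → List (String × Nat)
  | [] => [(c, k)]
  | x :: xs => if x = c then pvMerge c (k + 1) xs else (c, k) :: pvMerge x 1 xs

-- length of the equal-prefix run
def pvCnt (x : String) : List String → Nat
  | [] => 0
  | y :: ys => if y = x then pvCnt x ys + 1 else 0

-- B's lookahead test
def pvTen (x : String) (xs : List String) : Bool := xs.take 10 == List.replicate 10 x

-- B's scan with the predecessor carried explicitly
def pvWin (prev : String) : List String → List String
  | [] => []
  | x :: xs => (if (!(x == prev)) && pvTen x xs then [x] else []) ++ pvWin x xs

lemma pvEmit_cons (c : String) (k : Nat) (rs : List (String × Nat)) :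
    pvEmit ((c, k) :: rs) = (if k > 10 then [c] else []) ++ pvEmit rs := by
  by_cases h : k > 10 <;> simp [pvEmit, h]

lemma pvSliceN (l : List String) (j : Nat) :
    PySem.List.slice l (some ((j + 1 : Nat) : Int)) (some ((j + 11 : Nat) : Int))
      = (l.drop (j + 1)).take 10 := by
  rw [PySem.List.slice_natCast]; congr 1; omega

lemma pvFold_emit (xs : List String) : ∀ (acc : List String) (c : String) (k : Nat),
    (let st := xs.foldl
        (fun (s : List String × String × Nat) pred =>
          if pred = s.2.1 then (s.1, s.2.1, s.2.2 + 1)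
          else ((if s.2.2 > 10 then s.1 ++ [s.2.1] else s.1), pred, 1))
        (acc, c, k)
     if st.2.2 > 10 then st.1 ++ [st.2.1] else st.1)
    = acc ++ pvEmit (pvMerge c k xs) := by
  induction xs with
  | nil =>
    intro acc c k
    by_cases h : k > 10 <;> simp [pvMerge, pvEmit, h]
  | cons x xs ih =>
    intro acc c k
    by_cases h : x = c
    · simp only [List.foldl_cons, h, pvMerge, if_true]
      exact ih acc c (k + 1)
    · simp only [List.foldl_cons, pvMerge, if_neg h]
      rw [ih]
      by_cases hk : k > 10 <;> simp [pvEmit, hk]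

lemma pvTake_replicate (x : String) : ∀ (n : Nat) (l : List String),
    (l.take n == List.replicate n x) = decide (n ≤ pvCnt x l) := by
  intro n
  induction n with
  | zero => intro l; simp
  | succ n ih =>
    intro l
    cases l with
    | nil => simp [pvCnt]
    | cons y ys =>
      by_cases h : y = x
      · subst h
        simp only [List.take_succ_cons, List.replicate_succ, List.cons_beq_cons, pvCnt,
          beq_self_eq_true, Bool.true_and, ih ys]
        by_cases hn : n ≤ pvCnt y ys <;> simp [hn]
      · simp [pvCnt, h, List.replicate_succ]

lemma pvTen_cnt (x : String) (l : List String) : pvTen x l = decide (10 ≤ pvCnt x l) := by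
  simpa [pvTen] using pvTake_replicate x 10 l

lemma pvEmit_merge_win (xs : List String) : ∀ (c : String) (k : Nat),
    pvEmit (pvMerge c k xs) = (if 10 < k + pvCnt c xs then [c] else []) ++ pvWin c xs := by
  induction xs with
  | nil => intro c k; by_cases h : 10 < k <;> simp [pvMerge, pvEmit, pvWin, pvCnt, h]
  | cons x xs ih =>
    intro c k
    by_cases h : x = c
    · subst h
      rw [pvMerge, if_pos rfl, ih]
      have hc : pvCnt x (x :: xs) = pvCnt x xs + 1 := by simp [pvCnt]
      have hw : pvWin x (x :: xs) = pvWin x xs := by simp [pvWin]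
      rw [hc, hw, show k + (pvCnt x xs + 1) = k + 1 + pvCnt x xs from by omega]
    · rw [pvMerge, if_neg h, pvEmit_cons, ih x 1]
      have hc : pvCnt c (x :: xs) = 0 := by simp [pvCnt, h]
      have hw : pvWin c (x :: xs) = (if (!(x == c)) && pvTen x xs then [x] else []) ++ pvWin x xs := rfl
      rw [hc, hw, Nat.add_zero, pvTen_cnt]
      have hb : (!(x == c)) = true := by simp [h]
      rw [hb, Bool.true_and]
      by_cases h10 : 10 ≤ pvCnt x xs
      · simp [h10, show 10 < 1 + pvCnt x xs from by omega]
      · simp [h10, show ¬ 10 < 1 + pvCnt x xs from by omega]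

-- B's index comprehension over the tail, with predecessor prev carried in front, is pvWin prev
lemma pvIdx_win (l : List String) : ∀ (prev : String),
    (List.range l.length).filterMap (fun i =>
      if (!(l.getD i "" == (prev :: l).getD i ""))
         && ((l.drop (i + 1)).take 10 == List.replicate 10 (l.getD i ""))
      then some (l.getD i "") else none) = pvWin prev l := by
  induction l with
  | nil => intro prev; simp [pvWin]
  | cons x xs ih =>
    intro prev
    rw [List.length_cons, List.range_succ_eq_map, List.filterMap_cons, List.filterMap_map]
    have htail : (List.range xs.length).filterMap
        ((fun i =>
          if (!((x :: xs).getD i "" == (prev :: x :: xs).getD i ""))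
             && (((x :: xs).drop (i + 1)).take 10 == List.replicate 10 ((x :: xs).getD i ""))
          then some ((x :: xs).getD i "") else none) ∘ Nat.succ)
        = pvWin x xs := by
      rw [← ih x]
      apply List.filterMap_congr
      intro i _
      simp [Function.comp]
    rw [htail]
    simp only [List.getD_cons_zero, List.drop_succ_cons, List.drop_zero]
    cases hc : ((!(x == prev)) && (List.take 10 xs == List.replicate 10 x))
    · simp [pvWin, pvTen]
      simp [List.replicate_succ] at hc
      tauto
    · simp [pvWin, pvTen]
      simp [List.replicate_succ] at hc
      simp [hc]

-- ===== VERDICT (by name: the statement is the Claim_ definition above) =====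
theorem post_process_predictions_spec : Claim_equal_post_process_predictions := by
  intro predictions _
  unfold Spec_post_process_predictions post_process_predictions post_process_predictions_alt
  cases predictions with
  | nil => rfl
  | cons p0 rest =>
    have hA := pvFold_emit rest [] p0 1
    simp only [List.nil_append] at hA
    rw [pvEmit_merge_win] at hA
    have hB : (List.range (p0 :: rest).length).filterMap (fun i =>
        if (decide (i = 0) || !((p0 :: rest).getD i "" == (p0 :: rest).getD (i - 1) ""))
           && (PySem.List.slice (p0 :: rest) (some ((i + 1 : Nat) : Int)) (some ((i + 11 : Nat) : Int))
                 == List.replicate 10 ((p0 :: rest).getD i ""))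
        then some ((p0 :: rest).getD i "") else none)
        = (if 10 < 1 + pvCnt p0 rest then [p0] else []) ++ pvWin p0 rest := by
      rw [List.length_cons, List.range_succ_eq_map, List.filterMap_cons, List.filterMap_map]
      have htail : (List.range rest.length).filterMap
          ((fun i =>
            if (decide (i = 0) || !((p0 :: rest).getD i "" == (p0 :: rest).getD (i - 1) ""))
               && (PySem.List.slice (p0 :: rest) (some ((i + 1 : Nat) : Int)) (some ((i + 11 : Nat) : Int))
                     == List.replicate 10 ((p0 :: rest).getD i ""))
            then some ((p0 :: rest).getD i "") else none) ∘ Nat.succ)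
          = pvWin p0 rest := by
        rw [← pvIdx_win rest p0]
        apply List.filterMap_congr
        intro i _
        simp only [Function.comp_apply, Nat.succ_eq_add_one]
        rw [pvSliceN (p0 :: rest) (i + 1)]
        simp
      rw [htail]
      rw [pvSliceN (p0 :: rest) 0]
      simp only [List.getD_cons_zero, List.drop_succ_cons, List.drop_zero,
        decide_true, Bool.true_or, Bool.true_and]
      rw [pvTake_replicate p0 10 rest]
      by_cases h10 : 10 ≤ pvCnt p0 rest
      · simp [h10, show 10 < 1 + pvCnt p0 rest from by omega]
      · simp [h10, show ¬ 10 < 1 + pvCnt p0 rest from by omega]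
    simp only [List.isEmpty_cons, Bool.false_eq_true, if_false]
    rw [hA, hB]
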